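-- pv_equiv track=rewrite | github.com/SyntaxColoring/labware-scripts | definition_groups/detect_sibling_definitions.py | get_group_id
-- ===== SOURCE A (Python) =====
-- PARENT_SIGNIFIERS = {"aluminumblock", "tuberack", "adapter"}
--
-- def get_group_id(load_name: str) -> str:
--     """Return a string heuristically identifying which group a labware should belong to.
--
--     This tries to throw away info about the parent while retaining info about the child.
--     """
--     parts = load_name.split("_")
--
--     # Throw away parts that are just integers, e.g. the "96" in "opentrons_96_flat_bottom_adapter".
--     # They are problematic to deal with because they get deduplicated. For example, in
--     # "opentrons_96_flat_bottom_adapter_nest_wellplate_200ul_flat", it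
--     # is "nest_wellplate", not "nest_96_wellplate", even though the plate's standalone
--     # definition has "nest_96_wellplate".
--     #
--     # Also throw away certain keywords. e.g. "opentrons_96_aluminumblock_nest_wellplate_100ul"
--     # should be in the same group as "opentrons_96_pcr_adapter_nest_wellplate_100ul_pcr_full_skirt".
--     parts = [
--         part
--         for part in parts
--         if not (part.isnumeric() or part in {"flat", "full", "skirt", "pcr"})
--     ]
--
--     # Everything to the left of the parent signifier is part of the parent
--     # and everything to the right is part of the child.
--     try:
--         parent_signifier_index = next(
--             index for index, part in enumerate(parts) if part in PARENT_SIGNIFIERS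
--         )
--     except StopIteration:
--         pass
--     else:
--         parts = parts[parent_signifier_index + 1 :]
--
--     return "_".join(parts)
-- ===== SOURCE B (Python) =====
-- PARENT_SIGNIFIERS = {"aluminumblock", "tuberack", "adapter"}
--
--
-- def get_group_id(load_name: str) -> str:
--     """Single accumulator pass: skip numerics/noise words; the first parent
--     signifier resets the accumulator (dropping it and everything before)."""
--     kept = []
--     found = False
--     for part in load_name.split("_"):
--         if part.isnumeric() or part in {"flat", "full", "skirt", "pcr"}:
--             continue
--         if not found and part in PARENT_SIGNIFIERS:
--             found = True
--             kept = []
--         else: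
--             kept.append(part)
--     return "_".join(kept)
-- ===== Notes on version B (the rewrite author's own statement) =====
-- stated objective: simpler
-- what changed: Replaced A's three-stage pipeline (filter comprehension, next()-over-enumerate index search, list slice) by a single accumulator pass with a found-flag that resets the accumulator at the first parent signifier.
import Mathlib
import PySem

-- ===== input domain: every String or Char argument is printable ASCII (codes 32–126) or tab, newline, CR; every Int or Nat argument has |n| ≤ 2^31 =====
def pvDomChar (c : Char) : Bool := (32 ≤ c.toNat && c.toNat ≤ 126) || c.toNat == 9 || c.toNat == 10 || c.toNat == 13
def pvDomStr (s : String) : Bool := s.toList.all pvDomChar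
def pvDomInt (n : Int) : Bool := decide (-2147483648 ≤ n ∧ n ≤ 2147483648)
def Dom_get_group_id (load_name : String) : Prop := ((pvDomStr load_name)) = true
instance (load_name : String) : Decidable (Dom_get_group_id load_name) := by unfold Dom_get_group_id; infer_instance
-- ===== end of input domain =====

-- B replaces A's filter comprehension + next()-index + slice by one accumulator pass with a
-- found-flag (objective: simpler; same O(n) cost).
-- ('part.isnumeric()' is ported as PySem.Str.strIsdigit: identical on the ASCII domain.)

-- ===== PORT A =====
def PARENT_SIGNIFIERS : PySem.Set String :=
  PySem.Set.ofList ["aluminumblock", "tuberack", "adapter"]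

def get_group_id (load_name : String) : String :=
  -- load_name.split("_"): split? is always `some` here (the separator "_" is nonempty)
  let parts := (PySem.Str.split? load_name "_").getD []
  -- [part for part in parts if not (part.isnumeric() or part in {"flat","full","skirt","pcr"})]
  let parts := parts.filter (fun part =>
    !(PySem.Str.strIsdigit part ||
      PySem.Set.contains (PySem.Set.ofList ["flat", "full", "skirt", "pcr"]) part))
  -- next(index for index, part in enumerate(parts) if part in PARENT_SIGNIFIERS)
  match parts.findIdx? (fun part => PySem.Set.contains PARENT_SIGNIFIERS part) with
  | none => PySem.Str.join "_" parts
  | some i => PySem.Str.join "_" (PySem.List.slice parts (some ((i : Int) + 1)) none)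

-- ===== PORT B =====
def bStep (st : Bool × List String) (part : String) : Bool × List String :=
  if PySem.Str.strIsdigit part ||
      PySem.Set.contains (PySem.Set.ofList ["flat", "full", "skirt", "pcr"]) part then
    st
  else if !st.1 && PySem.Set.contains PARENT_SIGNIFIERS part then
    (true, [])
  else
    (st.1, st.2 ++ [part])

def get_group_id_alt (load_name : String) : String :=
  PySem.Str.join "_" (((PySem.Str.split? load_name "_").getD []).foldl bStep (false, [])).2

-- ===== PRECONDITION & SPEC =====
def Spec_get_group_id (load_name : String) (out : String) : Prop := out = get_group_id_alt load_name
instance (load_name : String) (out : String) : Decidable (Spec_get_group_id load_name out) := by unfold Spec_get_group_id; infer_instance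

-- ===== CLAIM (what is proved, stated in full; the proofs are below) =====
def Claim_equal_get_group_id : Prop := ∀ (load_name : String), Dom_get_group_id load_name → Spec_get_group_id load_name (get_group_id load_name)

-- ===== LEMMAS AND PROOFS =====

-- the part-keeping predicate shared (textually) by both ports
def keepPart (part : String) : Bool :=
  !(PySem.Str.strIsdigit part ||
    PySem.Set.contains (PySem.Set.ofList ["flat", "full", "skirt", "pcr"]) part)

def isSig (part : String) : Bool := PySem.Set.contains PARENT_SIGNIFIERS part

-- reference value: everything after the first signifier, or none if there is no signifier
def afterSig : List String → Option (List String)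
  | [] => none
  | p :: rest => if isSig p then some rest else afterSig rest

theorem afterSig_none_iff (q : List String) :
    afterSig q = none ↔ q.findIdx? isSig = none := by
  induction q with
  | nil => simp [afterSig]
  | cons p rest ih =>
    by_cases h : isSig p = true <;>
      simp [afterSig, List.findIdx?_cons, h, ih]

theorem portA_char (q : List String) :
    (match q.findIdx? isSig with
     | none => q
     | some i => q.drop (i + 1)) = (afterSig q).getD q := by
  induction q with
  | nil => simp [afterSig]
  | cons p rest ih =>
    by_cases h : isSig p = true
    · simp [List.findIdx?_cons, h, afterSig]
    · simp only [List.findIdx?_cons, h, Bool.false_eq_true, if_false, afterSig]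
      cases hf : rest.findIdx? isSig with
      | none =>
        have : afterSig rest = none := (afterSig_none_iff rest).mpr hf
        simp [this]
      | some j =>
        cases ha : afterSig rest with
        | none => rw [(afterSig_none_iff rest).mp ha] at hf; exact absurd hf (by simp)
        | some r =>
          have := ih
          rw [hf, ha] at this
          simp only [Option.map_some, Option.getD_some] at this ⊢
          simpa using this

theorem bStep_skip (st : Bool × List String) (part : String) (h : keepPart part = false) :
    bStep st part = st := by
  unfold keepPart at h
  rw [Bool.not_eq_false'] at h
  simp only [bStep]
  rw [if_pos h]

theorem foldl_bStep_filter (q : List String) (st : Bool × List String) :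
    q.foldl bStep st = (q.filter keepPart).foldl bStep st := by
  induction q generalizing st with
  | nil => rfl
  | cons p rest ih =>
    by_cases h : keepPart p = true
    · simp [h, List.foldl_cons, ih]
    · simp [h, List.foldl_cons, ih,
        bStep_skip st p (by simpa using h)]

theorem foldl_bStep_true (q : List String) (acc : List String)
    (hk : ∀ p ∈ q, keepPart p = true) :
    q.foldl bStep (true, acc) = (true, acc ++ q) := by
  induction q generalizing acc with
  | nil => simp
  | cons p rest ih =>
    have hp := hk p (by simp)
    have : bStep (true, acc) p = (true, acc ++ [p]) := by
      unfold keepPart at hp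
      rw [Bool.not_eq_true'] at hp
      simp only [bStep]
      rw [if_neg (by rw [hp]; simp)]
      simp
    rw [List.foldl_cons, this, ih (acc ++ [p]) (fun x hx => hk x (by simp [hx]))]
    simp

theorem foldl_bStep_false (q : List String) (acc : List String)
    (hk : ∀ p ∈ q, keepPart p = true) :
    (q.foldl bStep (false, acc)).2 = (afterSig q).getD (acc ++ q) := by
  induction q generalizing acc with
  | nil => simp [afterSig]
  | cons p rest ih =>
    have hp := hk p (by simp)
    have hrest : ∀ x ∈ rest, keepPart x = true := fun x hx => hk x (by simp [hx])
    by_cases h : isSig p = true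
    · have : bStep (false, acc) p = (true, []) := by
        unfold keepPart at hp
        rw [Bool.not_eq_true'] at hp
        unfold isSig at h
        simp only [bStep]
        rw [if_neg (by rw [hp]; simp),
          if_pos (by simp only [Bool.not_false, Bool.true_and]; exact h)]
      rw [List.foldl_cons, this, foldl_bStep_true rest [] hrest]
      simp [afterSig, h]
    · have : bStep (false, acc) p = (false, acc ++ [p]) := by
        unfold keepPart at hp
        rw [Bool.not_eq_true'] at hp
        unfold isSig at h
        simp only [bStep]
        rw [if_neg (by rw [hp]; simp),
          if_neg (by simp only [Bool.not_false, Bool.true_and]; exact h)]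
      rw [List.foldl_cons, this, ih (acc ++ [p]) hrest]
      simp [afterSig, h]

-- ===== VERDICT (by name: the statement is the Claim_ definition above) =====
theorem get_group_id_spec : Claim_equal_get_group_id := by
  intro load_name _
  unfold Spec_get_group_id get_group_id get_group_id_alt
  set parts0 := (PySem.Str.split? load_name "_").getD [] with hparts0
  set q := parts0.filter keepPart with hq
  have hfilter : parts0.filter (fun part =>
      !(PySem.Str.strIsdigit part ||
        PySem.Set.contains (PySem.Set.ofList ["flat", "full", "skirt", "pcr"]) part)) = q := rfl
  have hk : ∀ p ∈ q, keepPart p = true := fun p hp => (List.mem_filter.mp hp).2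
  have hB : ((parts0.foldl bStep (false, [])).2 : List String)
      = (afterSig q).getD q := by
    rw [foldl_bStep_filter, ← hq, foldl_bStep_false q [] hk]
    simp
  rw [hB]
  have hA := portA_char q
  cases hidx : q.findIdx? isSig with
  | none =>
    rw [hidx] at hA
    simp only [hfilter]
    unfold isSig at hidx
    rw [hidx, ← hA]
  | some i =>
    rw [hidx] at hA
    simp only [] at hA
    simp only [hfilter]
    unfold isSig at hidx
    rw [hidx]
    simp only []
    have hslice : PySem.List.slice q (some ((i : Int) + 1)) none = q.drop (i + 1) := by
      have : ((i : Int) + 1) = ((i + 1 : Nat) : Int) := by push_cast; ring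
      rw [this, PySem.List.slice_from_natCast]
    rw [hslice, ← hA]
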